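-- pv_equiv track=rewrite | github.com/Amorais1984/text-clean | voxtext/text_splitter.py | _find_last_sentence_end
-- ===== SOURCE A (Python) =====
-- def _find_last_sentence_end(text: str) -> int:
--     """
--     Encontra a posição do último finalizador de sentença no texto.
--
--     Prioridade: ponto final (.) > exclamação (!) > interrogação (?) > ponto e vírgula (;)
--
--     Retorna -1 se nenhum for encontrado.
--     """
--     # Procurar de trás para frente o último ponto final
--     # Ignorar pontos que fazem parte de abreviações (ex: "Dr.", "Sr.")
--     last_period = -1
--     for i in range(len(text) - 1, -1, -1):
--         ch = text[i]
--         if ch == ".":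
--             # Verificar se é fim de sentença (seguido de espaço, newline ou fim)
--             next_pos = i + 1
--             if next_pos >= len(text) or text[next_pos] in (" ", "\n", "\r"):
--                 # Verificar se NÃO é abreviação (palavra curta antes do ponto)
--                 word_start = i - 1
--                 while word_start >= 0 and text[word_start].isalpha():
--                     word_start -= 1
--                 word_before = text[word_start + 1:i]
--                 # Se a palavra antes do ponto tem 1-3 chars, pode ser abreviação
--                 # Mas ainda é um ponto válido para corte
--                 last_period = i
--                 break
--
--     if last_period != -1:
--         return last_period
--
--     # Fallback: ! ou ?
--     for ch in ("!", "?"):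
--         pos = text.rfind(ch)
--         if pos != -1:
--             return pos
--
--     # Fallback: ;
--     pos = text.rfind(";")
--     if pos != -1:
--         return pos
--
--     return -1
-- ===== SOURCE B (Python) =====
-- def _find_last_sentence_end(text: str) -> int:
--     """One forward pass recording the last sentence-ending '.', '!', '?', ';';
--     then return by priority . > ! > ? > ;  (-1 if none)."""
--     n = len(text)
--     p = e = q = s = -1
--     for i, ch in enumerate(text):
--         if ch == "." and (i + 1 >= n or text[i + 1] in (" ", "\n", "\r")):
--             p = i
--         elif ch == "!":
--             e = i
--         elif ch == "?":
--             q = i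
--         elif ch == ";":
--             s = i
--     if p != -1:
--         return p
--     if e != -1:
--         return e
--     if q != -1:
--         return q
--     return s
-- ===== Notes on version B (the rewrite author's own statement) =====
-- stated objective: alternative
-- what changed: Replaces the backward scan-with-break for the period (plus three separate rfind fallback passes) by a single forward pass that records the last qualifying '.', '!', '?' and ';' positions in four variables and picks by priority; also drops A's dead abbreviation-word computation.
import Mathlib
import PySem

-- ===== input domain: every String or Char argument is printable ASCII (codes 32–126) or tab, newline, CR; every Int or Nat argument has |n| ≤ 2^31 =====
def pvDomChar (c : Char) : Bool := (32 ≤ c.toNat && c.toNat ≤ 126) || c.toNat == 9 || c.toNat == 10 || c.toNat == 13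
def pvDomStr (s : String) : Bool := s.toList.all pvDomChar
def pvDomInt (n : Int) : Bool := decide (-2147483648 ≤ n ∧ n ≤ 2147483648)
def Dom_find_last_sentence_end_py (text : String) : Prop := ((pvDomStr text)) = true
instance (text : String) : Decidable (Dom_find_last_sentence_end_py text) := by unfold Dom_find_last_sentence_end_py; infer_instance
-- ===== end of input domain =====

-- B replaces A's backward scan-with-break plus three rfind fallback passes by a single
-- forward pass recording the last qualifying '.', '!', '?', ';' positions (alternative, same cost).

-- ===== PORT A =====
-- while word_start >= 0 and text[word_start].isalpha(): word_start -= 1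
def aWordStart (cs : List Char) (ws : Int) : Int :=
  if h : 0 ≤ ws ∧ PySem.Chars.strIsalpha [PySem.List.pyGetD cs ws ' '] = true then
    aWordStart cs (ws - 1)
  else ws
termination_by (ws + 1).toNat
decreasing_by omega

-- the backward 'for i in range(len(text)-1, -1, -1)' loop with its break
def aLoop (cs : List Char) : List Int → Int
  | [] => -1
  | i :: rest =>
    let ch := PySem.List.pyGetD cs i ' '
    if ch == '.' then
      let next_pos := i + 1
      if decide (next_pos ≥ (PySem.Chars.len cs)) ||
           (PySem.List.pyGetD cs next_pos ' ' == ' ' || PySem.List.pyGetD cs next_pos ' ' == '\n' ||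
            PySem.List.pyGetD cs next_pos ' ' == '\r') then
        let word_start := aWordStart cs (i - 1)
        let _word_before := PySem.List.slice cs (some (word_start + 1)) (some i)
        i
      else aLoop cs rest
    else aLoop cs rest

-- 'for ch in ("!", "?"): …' followed by the ';' fallback and 'return -1'
def aForLoop (text : String) : List String → Int
  | [] =>
    let pos := PySem.Str.rfind text ";"
    if pos ≠ -1 then pos else -1
  | ch :: rest =>
    let pos := PySem.Str.rfind text ch
    if pos ≠ -1 then pos else aForLoop text rest

def find_last_sentence_end_py (text : String) : Int :=
  let last_period := aLoop text.toList (PySem.List.pyRange ((PySem.Str.len text) - 1) (-1) (-1))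
  if last_period ≠ -1 then last_period else aForLoop text ["!", "?"]

-- ===== PORT B =====
-- loop body of Source B: one step updating the four accumulators (p, e, q, s)
def bStep (cs : List Char) (n : Int) (acc : Int × Int × Int × Int) (x : Int × Char) : Int × Int × Int × Int :=
  let (p, e, q, s) := acc
  let (i, ch) := x
  if ch == '.' && (decide (i + 1 ≥ n) ||
       (PySem.List.pyGetD cs (i + 1) ' ' == ' ' || PySem.List.pyGetD cs (i + 1) ' ' == '\n' ||
        PySem.List.pyGetD cs (i + 1) ' ' == '\r')) then
    (i, e, q, s)
  else if ch == '!' then (p, i, q, s)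
  else if ch == '?' then (p, e, i, s)
  else if ch == ';' then (p, e, q, i)
  else (p, e, q, s)

def find_last_sentence_end_py_alt (text : String) : Int :=
  let cs := text.toList
  let n := PySem.Str.len text
  let r := (PySem.List.enumerate cs 0).foldl (bStep cs n) (-1, -1, -1, -1)
  if r.1 ≠ -1 then r.1
  else if r.2.1 ≠ -1 then r.2.1
  else if r.2.2.1 ≠ -1 then r.2.2.1
  else r.2.2.2

-- ===== PRECONDITION & SPEC =====
def Spec_find_last_sentence_end_py (text : String) (out : Int) : Prop := out = find_last_sentence_end_py_alt text
instance (text : String) (out : Int) : Decidable (Spec_find_last_sentence_end_py text out) := by unfold Spec_find_last_sentence_end_py; infer_instance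

-- ===== CLAIM (what is proved, stated in full; the proofs are below) =====
def Claim_equal_find_last_sentence_end_py : Prop := ∀ (text : String), Dom_find_last_sentence_end_py text → Spec_find_last_sentence_end_py text (find_last_sentence_end_py text)

-- ===== LEMMAS AND PROOFS =====

-- the sentence-ending-period test, at a Nat index, on the real characters
def pC (cs : List Char) (k : Nat) : Bool :=
  cs.getD k ' ' == '.' &&
    (decide ((k : Int) + 1 ≥ (cs.length : Int)) ||
      (PySem.List.pyGetD cs ((k : Int) + 1) ' ' == ' ' || PySem.List.pyGetD cs ((k : Int) + 1) ' ' == '\n' ||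
       PySem.List.pyGetD cs ((k : Int) + 1) ' ' == '\r'))

-- the same test at an Int index, exactly as aLoop evaluates it
def pCI (cs : List Char) (i : Int) : Bool :=
  PySem.List.pyGetD cs i ' ' == '.' &&
    (decide (i + 1 ≥ (cs.length : Int)) ||
      (PySem.List.pyGetD cs (i + 1) ' ' == ' ' || PySem.List.pyGetD cs (i + 1) ' ' == '\n' ||
       PySem.List.pyGetD cs (i + 1) ' ' == '\r'))

-- last index < cs.length satisfying pC (the period candidate), and last index holding char c
def lastP (cs : List Char) : Int :=
  (List.range cs.length).foldl (fun a k => if pC cs k then (k : Int) else a) (-1)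
def lastC (cs : List Char) (c : Char) : Int :=
  (List.range cs.length).foldl (fun a k => if cs.getD k ' ' == c then (k : Int) else a) (-1)

theorem pCI_natCast (cs : List Char) (k : Nat) : pCI cs (k : Int) = pC cs k := by
  simp [pCI, pC, PySem.List.pyGetD_natCast]

theorem aLoop_cons (cs : List Char) (i : Int) (rest : List Int) :
    aLoop cs (i :: rest) = if pCI cs i then i else aLoop cs rest := by
  simp only [aLoop, pCI, PySem.Chars.len_eq]
  by_cases h1 : PySem.List.pyGetD cs i ' ' == '.'
  · simp only [h1, if_true, Bool.true_and]
    rfl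
  · simp [h1]

theorem aLoop_reverse (cs : List Char) (M : List Int) :
    aLoop cs M.reverse = M.foldl (fun a i => if pCI cs i then i else a) (-1) := by
  induction M using List.reverseRecOn with
  | nil => simp [aLoop]
  | append_singleton M x ih =>
    rw [List.reverse_append]
    rw [List.reverse_singleton, List.singleton_append, aLoop_cons, ih, List.foldl_append]
    rfl

theorem enum_eq (cs : List Char) (s : Int) :
    PySem.List.enumerate cs s = (List.range cs.length).map (fun (k : Nat) => (s + (k : Int), cs.getD k ' ')) := by
  induction cs generalizing s with
  | nil => simp [PySem.List.enumerate_nil]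
  | cons x xs ih =>
    rw [PySem.List.enumerate_cons, ih]
    simp only [List.length_cons, List.range_succ_eq_map, List.map_cons, List.map_map,
      Function.comp_def, Nat.cast_zero, add_zero, List.getD_cons_zero]
    refine congrArg (List.cons _) (List.map_congr_left fun k _ => ?_)
    simp
    ring

-- component projections of bStep
theorem bStep_pointwise (cs : List Char) (n : Int) (acc : Int × Int × Int × Int) (x : Int × Char) :
    bStep cs n acc x =
      ((if x.2 == '.' && (decide (x.1 + 1 ≥ n) ||
           (PySem.List.pyGetD cs (x.1 + 1) ' ' == ' ' || PySem.List.pyGetD cs (x.1 + 1) ' ' == '\n' ||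
            PySem.List.pyGetD cs (x.1 + 1) ' ' == '\r')) then x.1 else acc.1),
       (if x.2 == '!' then x.1 else acc.2.1),
       (if x.2 == '?' then x.1 else acc.2.2.1),
       (if x.2 == ';' then x.1 else acc.2.2.2)) := by
  obtain ⟨p, e, q, s⟩ := acc
  obtain ⟨i, ch⟩ := x
  simp only [bStep]
  split_ifs with h1 h2 h3 h4 <;> simp_all

theorem fold4 (cs : List Char) (n : Int) (l : List (Int × Char)) :
    ∀ (p e q s : Int),
      l.foldl (bStep cs n) (p, e, q, s) =
        (l.foldl (fun a x => if x.2 == '.' && (decide (x.1 + 1 ≥ n) ||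
             (PySem.List.pyGetD cs (x.1 + 1) ' ' == ' ' || PySem.List.pyGetD cs (x.1 + 1) ' ' == '\n' ||
              PySem.List.pyGetD cs (x.1 + 1) ' ' == '\r')) then x.1 else a) p,
         l.foldl (fun a x => if x.2 == '!' then x.1 else a) e,
         l.foldl (fun a x => if x.2 == '?' then x.1 else a) q,
         l.foldl (fun a x => if x.2 == ';' then x.1 else a) s) := by
  induction l with
  | nil => intro p e q s; rfl
  | cons x t ih =>
    intro p e q s
    rw [List.foldl_cons, bStep_pointwise]
    simpa using ih _ _ _ _

theorem prefix_single (cs : List Char) (c : Char) (hc : c ≠ ' ') (k : Nat) :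
    [c].isPrefixOf (cs.drop k) = (cs.getD k ' ' == c) := by
  rcases h : cs.drop k with _ | ⟨a, t⟩
  · have hlen : cs.length ≤ k := by
      have := congrArg List.length h
      simp [List.length_drop] at this
      omega
    simp [List.isPrefixOf, List.getD_eq_getElem?_getD, List.getElem?_eq_none hlen, Ne.symm hc]
  · have ha : cs.getD k ' ' = a := by
      have h0 : cs[k]? = some a := by
        have := congrArg (fun l => l[0]?) h
        simpa [List.getElem?_drop] using this
      simp [List.getD_eq_getElem?_getD, h0]
    rw [ha]
    simp [List.isPrefixOf, eq_comm]

theorem go_single (cs : List Char) (c : Char) (hc : c ≠ ' ') (m : Nat) :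
    PySem.Chars.rfind.go cs [c] m =
      (List.range (m + 1)).foldl (fun a k => if cs.getD k ' ' == c then (k : Int) else a) (-1) := by
  induction m with
  | zero =>
    have := prefix_single cs c hc 0
    simp at this
    simp [PySem.Chars.rfind.go, this]
  | succ m ih =>
    rw [List.range_succ, List.foldl_append, ← ih]
    simp only [List.foldl_cons, List.foldl_nil]
    have heq : [c].isPrefixOf (cs.drop (m + 1)) = (cs.getD (m + 1) ' ' == c) := prefix_single cs c hc (m + 1)
    simp [PySem.Chars.rfind.go, heq]

theorem rfind_single (cs : List Char) (c : Char) (hc : c ≠ ' ') :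
    PySem.Chars.rfind cs [c] = lastC cs c := by
  show PySem.Chars.rfind.go cs [c] cs.length = _
  rw [go_single cs c hc, List.range_succ, List.foldl_append]
  simp only [List.foldl_cons, List.foldl_nil, lastC]
  rw [List.getD_eq_default _ _ (le_refl _)]
  simp [beq_iff_eq, Ne.symm hc]

theorem A_char (text : String) :
    find_last_sentence_end_py text =
      (if lastP text.toList ≠ -1 then lastP text.toList
       else if lastC text.toList '!' ≠ -1 then lastC text.toList '!'
       else if lastC text.toList '?' ≠ -1 then lastC text.toList '?'
       else if lastC text.toList ';' ≠ -1 then lastC text.toList ';'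
       else -1) := by
  have hper : aLoop text.toList (PySem.List.pyRange ((PySem.Str.len text) - 1) (-1) (-1)) = lastP text.toList := by
    rw [PySem.Str.len_eq]
    have : ((text.toList.length : Int) - 1) = (-1) + 1 + ((text.toList.length : Int) - 1 + 1) - 1 := by ring
    rw [show PySem.List.pyRange ((text.toList.length : Int) - 1) (-1) (-1) =
          (PySem.List.pyRange 0 (text.toList.length : Int) 1).reverse by
        rw [PySem.List.pyRange_neg_one_eq_reverse]
        norm_num]
    rw [aLoop_reverse, PySem.List.pyRange_one, List.foldl_map]
    simp only [zero_add, Int.sub_zero, Int.toNat_natCast, pCI_natCast]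
    rfl
  simp only [find_last_sentence_end_py, hper, aForLoop,
    PySem.Str.rfind_eq, show "!".toList = ['!'] from rfl, show "?".toList = ['?'] from rfl,
    show ";".toList = [';'] from rfl,
    rfind_single _ '!' (by decide), rfind_single _ '?' (by decide), rfind_single _ ';' (by decide)]

theorem B_char (text : String) :
    find_last_sentence_end_py_alt text =
      (if lastP text.toList ≠ -1 then lastP text.toList
       else if lastC text.toList '!' ≠ -1 then lastC text.toList '!'
       else if lastC text.toList '?' ≠ -1 then lastC text.toList '?'
       else lastC text.toList ';') := by
  simp only [find_last_sentence_end_py_alt]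
  rw [fold4, enum_eq]
  simp only [List.foldl_map, zero_add, PySem.Str.len_eq, lastP, lastC, pC]
  rfl

theorem lastC_neg_one_or (cs : List Char) (c : Char) : lastC cs c = -1 ∨ 0 ≤ lastC cs c := by
  unfold lastC
  induction List.range cs.length using List.reverseRecOn with
  | nil => left; rfl
  | append_singleton t x ih =>
    rw [List.foldl_append]
    simp only [List.foldl_cons, List.foldl_nil]
    split
    · right; positivity
    · exact ih

-- ===== VERDICT (by name: the statement is the Claim_ definition above) =====
theorem find_last_sentence_end_py_spec : Claim_equal_find_last_sentence_end_py := by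
  intro text _
  unfold Spec_find_last_sentence_end_py
  rw [A_char, B_char]
  rcases lastC_neg_one_or text.toList ';' with h | h
  · simp [h]
  · have : lastC text.toList ';' ≠ -1 := by omega
    simp [this]
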